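-- pv_equiv track=rewrite | github.com/Wpawlina/AGH-ITCS-Course | cwiczenia/tablice dwuwymiarowe 4/sumSachWieza20.py | zad20
-- ===== SOURCE A (Python) =====
-- def sumOfChecked(t,r1,c1,r2,c2):
--     n=len(t)
--     sum=0
--     for i in range(n):
--             if i!=c1:
--                 sum+=t[r1][i]
--     for i in range(n):
--             if i!=r1:
--                 sum+=t[i][c1]
--     if r1!=r2 and c1!=c2:
--         for i in range(n):
--             if i!=c2:
--                 sum+=t[r2][i]
--         for i in range(n):
--             if i!=r2:
--                 sum+=t[i][c2]
--         sum=sum-t[r1][c2]-t[r2][c1]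
--         return sum
--     if r1==r2:
--         for i in range(n):
--             if i!=r2:
--                 sum+=t[i][c2]
--         sum+=t[r1][c1]
--         return sum
--     if c1==c2:
--         for i in range(n):
--             if i!=c2:
--                 sum+=t[r2][i]
--         sum+=t[r1][c1]
--         return sum
--
-- def zad20(t):
--     n=len(t)
--     biggest_sum=-float('inf')
--     maxr1=0
--     maxc1=0
--     maxr2=0
--     maxc2=0
--     for r in range(n):
--         for c in range(n):
--             for y in range(n):
--                 for x in range(n):
--                     if x!=c or y!=r:
--                         sum = sumOfChecked(t,r,c,y,x)
--                         if sum > biggest_sum: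
--                             biggest_sum=sum
--                             maxr1=r
--                             maxc1=c
--                             maxr2=y
--                             maxc2=x
--     return maxr1,maxc1,maxr2,maxc2
-- ===== SOURCE B (Python) =====
-- def zad20(t):
--     n = len(t)
--     R = [sum(t[i][j] for j in range(n)) for i in range(n)]
--     C = [sum(t[i][j] for i in range(n)) for j in range(n)]
--     best = None
--     ans = (0, 0, 0, 0)
--     for r in range(n):
--         for c in range(n):
--             base = R[r] + C[c] - t[r][c]
--             for y in range(n):
--                 for x in range(n):
--                     if x != c or y != r:
--                         if y != r and x != c:
--                             s = base - t[r][c] + R[y] + C[x] - 2 * t[y][x] - t[r][x] - t[y][c]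
--                         elif y == r:
--                             s = base + C[x] - t[y][x]
--                         else:
--                             s = base + R[y] - t[y][x]
--                         if best is None or s > best:
--                             best = s
--                             ans = (r, c, y, x)
--     return ans
-- ===== Notes on version B (the rewrite author's own statement) =====
-- stated objective: faster
-- what changed: B precomputes the n row sums and n column sums once and scores each ordered rook pair with a closed O(1) formula, removing A's per-pair sumOfChecked loops while keeping A's scan order and strict-improvement tie-breaking.
-- outside the precondition, e.g. on zad20([[]]): A returns (0, 0, 0, 0), B raises IndexError
import Mathlib
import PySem

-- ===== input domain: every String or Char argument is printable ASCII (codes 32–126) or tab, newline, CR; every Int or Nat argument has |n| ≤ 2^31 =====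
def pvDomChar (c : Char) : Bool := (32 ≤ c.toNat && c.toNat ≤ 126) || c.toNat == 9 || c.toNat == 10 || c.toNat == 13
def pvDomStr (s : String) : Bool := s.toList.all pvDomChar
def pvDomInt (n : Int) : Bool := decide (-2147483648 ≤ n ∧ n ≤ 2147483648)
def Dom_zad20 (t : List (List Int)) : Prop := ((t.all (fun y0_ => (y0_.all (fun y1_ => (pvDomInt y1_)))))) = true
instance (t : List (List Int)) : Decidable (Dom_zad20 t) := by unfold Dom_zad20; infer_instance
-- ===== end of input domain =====

-- B precomputes the n row sums and n column sums once and scores each rook pair by a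
-- closed O(1) formula, removing A's per-pair O(n) summation loops (same scan order and
-- tie-breaking, so the returned quadruple is identical).

-- t[r][i] (both indices in range on every access zad20 makes, under Pre_)
def pyAt (t : List (List Int)) (r i : Int) : Int :=
  PySem.List.pyGetD (PySem.List.pyGetD t r []) i 0

-- ===== PORT A =====
def sumOfChecked (t : List (List Int)) (r1 c1 r2 c2 : Int) : Int :=
  let n : Int := t.length
  let s1 := (PySem.List.pyRange 0 n 1).foldl
      (fun s i => if i ≠ c1 then s + pyAt t r1 i else s) 0
  let s2 := (PySem.List.pyRange 0 n 1).foldl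
      (fun s i => if i ≠ r1 then s + pyAt t i c1 else s) s1
  if r1 ≠ r2 ∧ c1 ≠ c2 then
    let s3 := (PySem.List.pyRange 0 n 1).foldl
        (fun s i => if i ≠ c2 then s + pyAt t r2 i else s) s2
    let s4 := (PySem.List.pyRange 0 n 1).foldl
        (fun s i => if i ≠ r2 then s + pyAt t i c2 else s) s3
    s4 - pyAt t r1 c2 - pyAt t r2 c1
  else if r1 = r2 then
    ((PySem.List.pyRange 0 n 1).foldl
        (fun s i => if i ≠ r2 then s + pyAt t i c2 else s) s2) + pyAt t r1 c1
  else if c1 = c2 then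
    ((PySem.List.pyRange 0 n 1).foldl
        (fun s i => if i ≠ c2 then s + pyAt t r2 i else s) s2) + pyAt t r1 c1
  else 0  -- Python falls off the end (None); unreachable from zad20's calls

def zad20 (t : List (List Int)) : Int × Int × Int × Int :=
  let n : Int := t.length
  let st := (PySem.List.pyRange 0 n 1).foldl (fun st r =>
    (PySem.List.pyRange 0 n 1).foldl (fun st c =>
      (PySem.List.pyRange 0 n 1).foldl (fun st y =>
        (PySem.List.pyRange 0 n 1).foldl (fun st x =>
          if x ≠ c ∨ y ≠ r then
            let s := sumOfChecked t r c y x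
            match st with               -- biggest_sum = -inf modelled as none
            | (none, _, _, _, _) => (some s, r, c, y, x)
            | (some b, a1, a2, a3, a4) =>
                if b < s then (some s, r, c, y, x) else (some b, a1, a2, a3, a4)
          else st) st) st) st)
    ((none : Option Int), (0 : Int), (0 : Int), (0 : Int), (0 : Int))
  (st.2.1, st.2.2.1, st.2.2.2.1, st.2.2.2.2)

-- ===== PORT B =====
def zad20_alt (t : List (List Int)) : Int × Int × Int × Int :=
  let n : Int := t.length
  let R := (PySem.List.pyRange 0 n 1).map (fun i =>
    (PySem.List.pyRange 0 n 1).foldl (fun s j => s + pyAt t i j) 0)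
  let C := (PySem.List.pyRange 0 n 1).map (fun j =>
    (PySem.List.pyRange 0 n 1).foldl (fun s i => s + pyAt t i j) 0)
  let st := (PySem.List.pyRange 0 n 1).foldl (fun st r =>
    (PySem.List.pyRange 0 n 1).foldl (fun st c =>
      let base := PySem.List.pyGetD R r 0 + PySem.List.pyGetD C c 0 - pyAt t r c
      (PySem.List.pyRange 0 n 1).foldl (fun st y =>
        (PySem.List.pyRange 0 n 1).foldl (fun st x =>
          if x ≠ c ∨ y ≠ r then
            let s :=
              if y ≠ r ∧ x ≠ c then
                base - pyAt t r c + PySem.List.pyGetD R y 0 + PySem.List.pyGetD C x 0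
                  - 2 * pyAt t y x - pyAt t r x - pyAt t y c
              else if y = r then base + PySem.List.pyGetD C x 0 - pyAt t y x
              else base + PySem.List.pyGetD R y 0 - pyAt t y x
            match st with               -- best = None until the first admissible pair
            | (none, _, _, _, _) => (some s, r, c, y, x)
            | (some b, a1, a2, a3, a4) =>
                if b < s then (some s, r, c, y, x) else (some b, a1, a2, a3, a4)
          else st) st) st) st)
    ((none : Option Int), (0 : Int), (0 : Int), (0 : Int), (0 : Int))
  (st.2.1, st.2.2.1, st.2.2.2.1, st.2.2.2.2)

-- ===== PRECONDITION & SPEC =====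
-- Pre_ excludes the inputs with a row shorter than len(t): there Python A raises IndexError,
-- except for the boards of size 1 with an empty row (e.g. [[]]), where A returns (0,0,0,0)
-- without ever indexing while B's sum precomputation raises IndexError (see claim cites).
-- Rows longer than len(t) are fine: both read only the first len(t) entries of each row.
def Pre_zad20 (t : List (List Int)) : Prop :=
  (t.all (fun row => t.length ≤ row.length)) = true
instance (t : List (List Int)) : Decidable (Pre_zad20 t) := by unfold Pre_zad20; infer_instance

def pvWitness_zad20 : List (List Int) := [[1, 2], [3, 4]]

def Spec_zad20 (t : List (List Int)) (out : Int × Int × Int × Int) : Prop := out = zad20_alt t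
instance (t : List (List Int)) (out : Int × Int × Int × Int) : Decidable (Spec_zad20 t out) := by unfold Spec_zad20; infer_instance

-- ===== CLAIM (what is proved, stated in full; the proofs are below) =====
def Claim_equal_zad20 : Prop := ∀ (t : List (List Int)), Dom_zad20 t → Pre_zad20 t → Spec_zad20 t (zad20 t)

-- ===== LEMMAS AND PROOFS =====

-- a loop 'for i in l: if i != c: s += f(i)' over a duplicate-free l containing c
lemma foldl_skip (c : Int) (f : Int → Int) :
    ∀ (l : List Int), l.Nodup → c ∈ l → ∀ (a : Int),
      l.foldl (fun s i => if i ≠ c then s + f i else s) a = a + (l.map f).sum - f c := by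
  intro l
  induction l with
  | nil => intro _ hc; exact absurd hc (List.not_mem_nil)
  | cons hd tl ih =>
    intro hnd hc a
    rcases List.nodup_cons.mp hnd with ⟨hh, hndtl⟩
    rcases List.mem_cons.mp hc with hch | hctl
    · subst hch
      have h1 : List.foldl (fun s i => if i ≠ c then s + f i else s) a (c :: tl)
          = List.foldl (fun s i => if i ≠ c then s + f i else s) a tl := by
        simp [List.foldl_cons]
      have h2 : List.foldl (fun s i => if i ≠ c then s + f i else s) a tl
          = List.foldl (fun s i => s + f i) a tl := by
        apply PySem.List.foldl_congr_mem
        intro acc z hz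
        have hzc : z ≠ c := fun e => hh (e ▸ hz)
        simp [hzc]
      rw [h1, h2, PySem.List.foldl_add]
      simp; ring
    · have hne : hd ≠ c := fun e => hh (e ▸ hctl)
      have h1 : List.foldl (fun s i => if i ≠ c then s + f i else s) a (hd :: tl)
          = List.foldl (fun s i => if i ≠ c then s + f i else s) (a + f hd) tl := by
        simp [List.foldl_cons, hne]
      rw [h1, ih hndtl hctl]
      simp; ring

-- per-pair closed form: A's sumOfChecked equals B's O(1) score
lemma soc_eq (t : List (List Int)) (r c y x : Int)
    (hr : 0 ≤ r ∧ r < (t.length : Int)) (hc : 0 ≤ c ∧ c < (t.length : Int))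
    (hy : 0 ≤ y ∧ y < (t.length : Int)) (hx : 0 ≤ x ∧ x < (t.length : Int))
    (hne : x ≠ c ∨ y ≠ r) :
    sumOfChecked t r c y x =
      (if y ≠ r ∧ x ≠ c then
        (PySem.List.pyGetD ((PySem.List.pyRange 0 (t.length : Int) 1).map (fun i =>
            (PySem.List.pyRange 0 (t.length : Int) 1).foldl (fun s j => s + pyAt t i j) 0)) r 0
         + PySem.List.pyGetD ((PySem.List.pyRange 0 (t.length : Int) 1).map (fun j =>
            (PySem.List.pyRange 0 (t.length : Int) 1).foldl (fun s i => s + pyAt t i j) 0)) c 0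
         - pyAt t r c)
          - pyAt t r c
          + PySem.List.pyGetD ((PySem.List.pyRange 0 (t.length : Int) 1).map (fun i =>
            (PySem.List.pyRange 0 (t.length : Int) 1).foldl (fun s j => s + pyAt t i j) 0)) y 0
          + PySem.List.pyGetD ((PySem.List.pyRange 0 (t.length : Int) 1).map (fun j =>
            (PySem.List.pyRange 0 (t.length : Int) 1).foldl (fun s i => s + pyAt t i j) 0)) x 0
          - 2 * pyAt t y x - pyAt t r x - pyAt t y c
      else if y = r then
        (PySem.List.pyGetD ((PySem.List.pyRange 0 (t.length : Int) 1).map (fun i =>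
            (PySem.List.pyRange 0 (t.length : Int) 1).foldl (fun s j => s + pyAt t i j) 0)) r 0
         + PySem.List.pyGetD ((PySem.List.pyRange 0 (t.length : Int) 1).map (fun j =>
            (PySem.List.pyRange 0 (t.length : Int) 1).foldl (fun s i => s + pyAt t i j) 0)) c 0
         - pyAt t r c)
          + PySem.List.pyGetD ((PySem.List.pyRange 0 (t.length : Int) 1).map (fun j =>
            (PySem.List.pyRange 0 (t.length : Int) 1).foldl (fun s i => s + pyAt t i j) 0)) x 0
          - pyAt t y x
      else
        (PySem.List.pyGetD ((PySem.List.pyRange 0 (t.length : Int) 1).map (fun i =>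
            (PySem.List.pyRange 0 (t.length : Int) 1).foldl (fun s j => s + pyAt t i j) 0)) r 0
         + PySem.List.pyGetD ((PySem.List.pyRange 0 (t.length : Int) 1).map (fun j =>
            (PySem.List.pyRange 0 (t.length : Int) 1).foldl (fun s i => s + pyAt t i j) 0)) c 0
         - pyAt t r c)
          + PySem.List.pyGetD ((PySem.List.pyRange 0 (t.length : Int) 1).map (fun i =>
            (PySem.List.pyRange 0 (t.length : Int) 1).foldl (fun s j => s + pyAt t i j) 0)) y 0
          - pyAt t y x) := by
  have hnd := PySem.List.nodup_pyRange_one (a := 0) (b := (t.length : Int))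
  have hmem : ∀ z : Int, 0 ≤ z ∧ z < (t.length : Int) →
      z ∈ PySem.List.pyRange 0 (t.length : Int) 1 := by
    intro z hz; exact (PySem.List.mem_pyRange_one).mpr ⟨hz.1, hz.2⟩
  have hR : ∀ z : Int, 0 ≤ z ∧ z < (t.length : Int) →
      PySem.List.pyGetD ((PySem.List.pyRange 0 (t.length : Int) 1).map (fun i =>
        (PySem.List.pyRange 0 (t.length : Int) 1).foldl (fun s j => s + pyAt t i j) 0)) z 0
      = ((PySem.List.pyRange 0 (t.length : Int) 1).map (fun j => pyAt t z j)).sum := by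
    intro z hz
    rw [PySem.List.pyGetD_map_pyRange_of_nonneg _ _ _ _ hz.1 hz.2, PySem.List.foldl_add]
    ring
  have hC : ∀ z : Int, 0 ≤ z ∧ z < (t.length : Int) →
      PySem.List.pyGetD ((PySem.List.pyRange 0 (t.length : Int) 1).map (fun j =>
        (PySem.List.pyRange 0 (t.length : Int) 1).foldl (fun s i => s + pyAt t i j) 0)) z 0
      = ((PySem.List.pyRange 0 (t.length : Int) 1).map (fun i => pyAt t i z)).sum := by
    intro z hz
    rw [PySem.List.pyGetD_map_pyRange_of_nonneg _ _ _ _ hz.1 hz.2, PySem.List.foldl_add]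
    ring
  unfold sumOfChecked
  simp only []
  by_cases hyr : y = r
  · -- same row; the guard forces x ≠ c
    have hxc : x ≠ c := hne.resolve_right (fun h => h hyr)
    subst hyr
    rw [if_neg (show ¬(y ≠ y ∧ c ≠ x) by tauto), if_pos rfl,
        if_neg (show ¬(y ≠ y ∧ x ≠ c) by tauto), if_pos rfl]
    rw [foldl_skip c (fun i => pyAt t y i) _ hnd (hmem c hc),
        foldl_skip y (fun i => pyAt t i c) _ hnd (hmem y hr),
        foldl_skip y (fun i => pyAt t i x) _ hnd (hmem y hr),
        hR y hr, hC c hc, hC x hx]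
    ring
  · by_cases hxc : x = c
    · subst hxc
      rw [if_neg (show ¬(r ≠ y ∧ x ≠ x) by tauto),
          if_neg (show ¬r = y from fun h => hyr h.symm), if_pos rfl,
          if_neg (show ¬(y ≠ r ∧ x ≠ x) by tauto), if_neg hyr]
      rw [foldl_skip x (fun i => pyAt t r i) _ hnd (hmem x hx),
          foldl_skip r (fun i => pyAt t i x) _ hnd (hmem r hr),
          foldl_skip x (fun i => pyAt t y i) _ hnd (hmem x hx),
          hR r hr, hC x hx, hR y hy]
      ring
    · rw [if_pos (show r ≠ y ∧ c ≠ x from ⟨fun h => hyr h.symm, fun h => hxc h.symm⟩),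
          if_pos (show y ≠ r ∧ x ≠ c from ⟨hyr, hxc⟩)]
      rw [foldl_skip c (fun i => pyAt t r i) _ hnd (hmem c hc),
          foldl_skip r (fun i => pyAt t i c) _ hnd (hmem r hr),
          foldl_skip x (fun i => pyAt t y i) _ hnd (hmem x hx),
          foldl_skip y (fun i => pyAt t i x) _ hnd (hmem y hy),
          hR r hr, hC c hc, hR y hy, hC x hx]
      ring

-- ===== VERDICT (by name: the statement is the Claim_ definition above) =====
theorem zad20_spec : Claim_equal_zad20 := by
  intro t _ _
  unfold Spec_zad20 zad20 zad20_alt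
  simp only []
  refine congrArg (fun st : Option Int × Int × Int × Int × Int =>
    (st.2.1, st.2.2.1, st.2.2.2.1, st.2.2.2.2)) ?_
  apply PySem.List.foldl_congr_mem
  intro st r hrmem
  apply PySem.List.foldl_congr_mem
  intro st c hcmem
  apply PySem.List.foldl_congr_mem
  intro st y hymem
  apply PySem.List.foldl_congr_mem
  intro st x hxmem
  by_cases hne : x ≠ c ∨ y ≠ r
  · rw [if_pos hne, if_pos hne]
    have hr := (PySem.List.mem_pyRange_one).mp hrmem
    have hc := (PySem.List.mem_pyRange_one).mp hcmem
    have hy := (PySem.List.mem_pyRange_one).mp hymem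
    have hx := (PySem.List.mem_pyRange_one).mp hxmem
    rw [soc_eq t r c y x ⟨hr.1, hr.2⟩ ⟨hc.1, hc.2⟩ ⟨hy.1, hy.2⟩ ⟨hx.1, hx.2⟩ hne]
  · rw [if_neg hne, if_neg hne]
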